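-- pv_equiv track=rewrite | github.com/camargodev/advent-of-code | d7c2.py | check_max_rem_time
-- ===== SOURCE A (Python) =====
-- def check_max_rem_time(rem_time):
-- 	tmp_rem_time = []
-- 	for t in rem_time:
-- 		if t != -1:
-- 			tmp_rem_time.append(t)
-- 	if not tmp_rem_time:
-- 		return True
-- 	else:
-- 		return max(tmp_rem_time) > 0
-- ===== SOURCE B (Python) =====
-- def check_max_rem_time(rem_time):
-- 	seen_real = False
-- 	any_positive = False
-- 	for t in rem_time:
-- 		if t != -1:
-- 			seen_real = True
-- 		if t > 0:
-- 			any_positive = True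
-- 	return any_positive or not seen_real
-- ===== Notes on version B (the rewrite author's own statement) =====
-- stated objective: simpler
-- what changed: Replaces A's collect-then-reduce (build a filtered temporary list, then a separate max() scan) with a single pass accumulating two boolean flags (seen a non-(-1) element; seen a positive element), returning any_positive or not seen_real.
import Mathlib
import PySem

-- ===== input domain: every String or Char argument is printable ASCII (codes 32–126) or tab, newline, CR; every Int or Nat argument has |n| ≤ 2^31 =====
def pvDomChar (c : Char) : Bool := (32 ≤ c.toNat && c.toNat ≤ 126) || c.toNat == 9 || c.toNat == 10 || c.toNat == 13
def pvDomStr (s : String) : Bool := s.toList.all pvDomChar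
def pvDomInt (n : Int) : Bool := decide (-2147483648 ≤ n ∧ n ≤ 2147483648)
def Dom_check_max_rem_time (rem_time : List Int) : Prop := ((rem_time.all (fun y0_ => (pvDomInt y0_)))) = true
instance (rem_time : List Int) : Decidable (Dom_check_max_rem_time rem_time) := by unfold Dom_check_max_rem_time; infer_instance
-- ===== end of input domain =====

-- ===== PORT A =====
-- B: one pass with two boolean flags instead of A's filtered temporary list plus max() scan (objective: simpler).
def check_max_rem_time (rem_time : List Int) : Bool :=
  let tmp_rem_time := rem_time.foldl (fun acc t => if t ≠ -1 then acc ++ [t] else acc) []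
  if tmp_rem_time = [] then true
  else match PySem.List.max? tmp_rem_time (fun x => x) with
    | some m => decide (m > 0)
    | none => true  -- unreachable: tmp_rem_time ≠ []

-- ===== PORT B =====
def check_max_rem_time_alt (rem_time : List Int) : Bool :=
  let p := rem_time.foldl
    (fun (p : Bool × Bool) t => (p.1 || decide (t ≠ -1), p.2 || decide (t > 0)))
    (false, false)
  p.2 || !p.1

-- ===== PRECONDITION & SPEC =====
def Spec_check_max_rem_time (rem_time : List Int) (out : Bool) : Prop := out = check_max_rem_time_alt rem_time
instance (rem_time : List Int) (out : Bool) : Decidable (Spec_check_max_rem_time rem_time out) := by unfold Spec_check_max_rem_time; infer_instance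

-- ===== CLAIM (what is proved, stated in full; the proofs are below) =====
def Claim_equal_check_max_rem_time : Prop := ∀ (rem_time : List Int), Dom_check_max_rem_time rem_time → Spec_check_max_rem_time rem_time (check_max_rem_time rem_time)

-- ===== LEMMAS AND PROOFS =====

-- ===== VERDICT (by name: the statement is the Claim_ definition above) =====
lemma filt_foldl (l : List Int) (acc : List Int) :
    l.foldl (fun acc t => if t ≠ -1 then acc ++ [t] else acc) acc
      = acc ++ l.filter (fun t => t ≠ -1) := by
  induction l generalizing acc with
  | nil => simp
  | cons h t ih =>
    simp only [List.foldl_cons]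
    rw [ih]
    by_cases hh : h = -1 <;> simp [hh]

lemma flags_foldl (l : List Int) (p : Bool × Bool) :
    l.foldl (fun (p : Bool × Bool) t => (p.1 || decide (t ≠ -1), p.2 || decide (t > 0))) p
      = (p.1 || l.any (fun t => decide (t ≠ -1)), p.2 || l.any (fun t => decide (t > 0))) := by
  induction l generalizing p with
  | nil => simp
  | cons h t ih =>
    simp only [List.foldl_cons, List.any_cons]
    rw [ih]
    simp [Bool.or_assoc]

-- ===== VERDICT (by name: the statement is the Claim_ definition above) =====
theorem check_max_rem_time_spec : Claim_equal_check_max_rem_time := by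
  intro rem_time _
  unfold Spec_check_max_rem_time check_max_rem_time check_max_rem_time_alt
  rw [filt_foldl, flags_foldl]
  simp only [List.nil_append, Bool.false_or]
  rcases hf : rem_time.filter (fun t => decide (t ≠ -1)) with _ | ⟨x, xs⟩
  · rw [if_pos rfl]
    have : ∀ t ∈ rem_time, ¬ (t ≠ -1) := by
      intro t ht
      have := List.filter_eq_nil_iff.mp hf t ht
      simpa using this
    have h1 : rem_time.any (fun t => decide (t ≠ -1)) = false := by
      simp only [List.any_eq_false]
      intro t ht; simpa using this t ht
    have h2 : rem_time.any (fun t => decide (t > 0)) = false := by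
      simp only [List.any_eq_false]
      intro t ht
      have := this t ht
      simp at this ⊢
      omega
    rw [h1, h2]; rfl
  · have hne : (x :: xs : List Int) ≠ [] := by simp
    rw [if_neg hne, PySem.List.max?_id_cons]
    -- A returns decide (foldl max x xs > 0); show it equals any (> 0) || !any (≠ -1)
    have h1 : rem_time.any (fun t => decide (t ≠ -1)) = true := by
      have hx : x ∈ rem_time.filter (fun t => decide (t ≠ -1)) := by rw [hf]; simp
      rw [List.mem_filter] at hx
      exact List.any_eq_true.mpr ⟨x, hx.1, hx.2⟩
    simp only [h1, Bool.not_true, Bool.or_false]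
    have hmax := PySem.List.le_foldl_max xs x
    have hmem := PySem.List.foldl_max_mem xs x
    by_cases hp : rem_time.any (fun t => decide (t > 0)) = true
    · rw [hp]
      obtain ⟨t, ht, htp⟩ := List.any_eq_true.mp hp
      simp only [decide_eq_true_eq] at htp
      have htf : t ∈ x :: xs := by
        rw [← hf, List.mem_filter]
        exact ⟨ht, by simp; omega⟩
      have : t ≤ xs.foldl max x := by
        rcases List.mem_cons.mp htf with h | h
        · subst h; exact hmax.1
        · exact hmax.2 t h
      simp only [decide_eq_true_eq]; omega
    · simp only [Bool.not_eq_true] at hp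
      rw [hp]
      have hall : ∀ t ∈ rem_time, ¬ (t > 0) := by
        rw [List.any_eq_false] at hp
        intro t ht; simpa using hp t ht
      have hm_in : xs.foldl max x ∈ rem_time := by
        have hmf : xs.foldl max x ∈ x :: xs := by
          rcases hmem with h | h
          · rw [h]; simp
          · simp [h]
        rw [← hf] at hmf
        exact (List.mem_filter.mp hmf).1
      have := hall _ hm_in
      simp only [decide_eq_false_iff_not]
      omega
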